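-- pv_equiv track=rewrite | github.com/eternidad33/leetcode | code/LCCUP21力扣杯秋季编程大赛/1.py | minimumSwitchingTimes
-- ===== SOURCE A (Python) =====
-- from typing import List
--
-- def minimumSwitchingTimes(source: List[List[int]], target: List[List[int]]) -> int:
--     count = 0
--     m = dict()  # 哈希表
--     for s0 in source:
--         for s in s0:
--             m[s] = m.get(s, 0) + 1
--
--     for s1 in target:
--         for s in s1:
--             if m.get(s, 0) > 0:
--                 """source中存在这个数"""
--                 m[s] -= 1
--             else:
--                 count += 1
--
--     return count
-- ===== SOURCE B (Python) =====
-- def minimumSwitchingTimes(source, target):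
--     cs = {}
--     for row in source:
--         for v in row:
--             cs[v] = cs.get(v, 0) + 1
--     ct = {}
--     total = 0
--     for row in target:
--         for v in row:
--             ct[v] = ct.get(v, 0) + 1
--             total += 1
--     matched = sum(min(cs.get(v, 0), c) for v, c in ct.items())
--     return total - matched
-- ===== Notes on version B (the rewrite author's own statement) =====
-- stated objective: alternative
-- what changed: Replaces the greedy consume-while-scanning loop over target (which decrements a shared counter and counts misses) by building two independent counters and returning total target cells minus the multiset-intersection size sum(min(cs[v], ct[v])).
import Mathlib
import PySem

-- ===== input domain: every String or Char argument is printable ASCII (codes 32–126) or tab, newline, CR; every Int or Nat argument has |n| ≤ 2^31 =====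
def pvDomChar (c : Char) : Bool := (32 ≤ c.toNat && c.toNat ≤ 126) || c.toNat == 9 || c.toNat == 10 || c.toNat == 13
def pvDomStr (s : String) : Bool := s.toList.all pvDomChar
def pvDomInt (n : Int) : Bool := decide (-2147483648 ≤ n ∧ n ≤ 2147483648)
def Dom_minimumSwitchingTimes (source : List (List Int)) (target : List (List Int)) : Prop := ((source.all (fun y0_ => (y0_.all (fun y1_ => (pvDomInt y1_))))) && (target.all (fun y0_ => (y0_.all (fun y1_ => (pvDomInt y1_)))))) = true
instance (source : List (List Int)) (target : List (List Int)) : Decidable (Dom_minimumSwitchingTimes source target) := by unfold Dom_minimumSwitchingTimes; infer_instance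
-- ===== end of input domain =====

-- B replaces A's greedy consume-while-scanning loop over target by two independent
-- counters and a multiset-intersection sum (alternative decomposition, same cost).


-- ===== PORT A =====
def minimumSwitchingTimes (source : List (List Int)) (target : List (List Int)) : Int :=
  -- m[s] = m.get(s, 0) + 1 over the nested source loop
  let m : PySem.Dict Int Int :=
    source.foldl (fun d s0 => s0.foldl (fun d s => d.insert s (d.getD s 0 + 1)) d) PySem.Dict.empty
  -- nested target loop: state = (count, m); m[s] -= 1 when m.get(s, 0) > 0, else count += 1
  let st : Int × PySem.Dict Int Int :=
    target.foldl (fun st s1 => s1.foldl (fun st s =>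
      if st.2.getD s 0 > 0 then (st.1, st.2.insert s (st.2.getD s 0 - 1))
      else (st.1 + 1, st.2)) st) ((0 : Int), m)
  st.1

-- ===== PORT B =====
def minimumSwitchingTimes_alt (source : List (List Int)) (target : List (List Int)) : Int :=
  -- counter of all source cells
  let cs : PySem.Dict Int Int :=
    source.foldl (fun d row => row.foldl (fun d v => d.insert v (d.getD v 0 + 1)) d) PySem.Dict.empty
  -- counter of all target cells, together with the total number of target cells
  let st : PySem.Dict Int Int × Int :=
    target.foldl (fun st row => row.foldl (fun st v =>
      (st.1.insert v (st.1.getD v 0 + 1), st.2 + 1)) st) (PySem.Dict.empty, (0 : Int))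
  -- matched = sum(min(cs.get(v, 0), c) for v, c in ct.items())
  let matched : Int := (st.1.items.map (fun p => min (cs.getD p.1 0) p.2)).sum
  st.2 - matched

-- ===== PRECONDITION & SPEC =====
def Spec_minimumSwitchingTimes (source : List (List Int)) (target : List (List Int)) (out : Int) : Prop := out = minimumSwitchingTimes_alt source target
instance (source : List (List Int)) (target : List (List Int)) (out : Int) : Decidable (Spec_minimumSwitchingTimes source target out) := by unfold Spec_minimumSwitchingTimes; infer_instance

-- ===== CLAIM (what is proved, stated in full; the proofs are below) =====
def Claim_equal_minimumSwitchingTimes : Prop := ∀ (source : List (List Int)) (target : List (List Int)), Dom_minimumSwitchingTimes source target → Spec_minimumSwitchingTimes source target (minimumSwitchingTimes source target)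

-- ===== LEMMAS AND PROOFS =====

-- Splitting a sum over `insert s T` against a sum over `T` when the summands
-- agree away from `s`.
theorem pv_split_sum (T : Finset Int) (s : Int) (f g : Int → Int)
    (h : ∀ k ∈ T.erase s, f k = g k) :
    (∑ k ∈ insert s T, f k) + (if s ∈ T then g s else 0) = f s + ∑ k ∈ T, g k := by
  by_cases hs : s ∈ T
  · rw [Finset.insert_eq_self.mpr hs, if_pos hs,
      ← Finset.add_sum_erase T f hs, ← Finset.add_sum_erase T g hs,
      Finset.sum_congr rfl h]
    ring
  · have he : T.erase s = T := Finset.erase_eq_self.mpr hs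
    rw [if_neg hs, Finset.sum_insert hs, add_zero,
      Finset.sum_congr rfl (fun k hk => h k (by rw [he]; exact hk))]

-- A's greedy fold over the flattened target, started from any counter `m` with
-- nonnegative values, counts |ts| minus the multiset-intersection size.
theorem pv_greedy_count (ts : List Int) :
    ∀ (c : Int) (m : PySem.Dict Int Int), (∀ k, 0 ≤ m.getD k 0) →
    (ts.foldl (fun st s =>
      if st.2.getD s 0 > 0 then (st.1, st.2.insert s (st.2.getD s 0 - 1))
      else (st.1 + 1, st.2)) (c, m)).1
      = c + (ts.length : Int) - ∑ k ∈ ts.toFinset, min (m.getD k 0) ((ts.count k : Int)) := by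
  induction ts with
  | nil => intro c m _; simp
  | cons s rest ih =>
    intro c m hm
    rw [List.foldl_cons]
    have hcnt : ∀ k : Int, (((s :: rest).count k : Int))
        = (rest.count k : Int) + (if k = s then 1 else 0) := by
      intro k
      by_cases h : k = s
      · simp [h]
      · simp [List.count_cons, h]
        omega
    have hmem : s ∈ rest.toFinset ↔ 0 < (rest.count s : Int) := by
      rw [List.mem_toFinset, ← List.count_pos_iff]
      exact_mod_cast Iff.rfl
    by_cases hs : m.getD s 0 > 0
    · -- source still has this value: decrement, count unchanged
      have hstep : (if (c, m).2.getD s 0 > 0 then ((c, m).1, (c, m).2.insert s ((c, m).2.getD s 0 - 1))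
          else ((c, m).1 + 1, (c, m).2)) = (c, m.insert s (m.getD s 0 - 1)) := by simp [hs]
      rw [hstep]
      have hm' : ∀ k, 0 ≤ (m.insert s (m.getD s 0 - 1)).getD k 0 := by
        intro k
        rw [PySem.Dict.getD_insert]
        split_ifs with h
        · omega
        · exact hm k
      rw [ih c _ hm']
      have hagree : ∀ k ∈ rest.toFinset.erase s,
          min (m.getD k 0) (((s :: rest).count k : Int))
            = min ((m.insert s (m.getD s 0 - 1)).getD k 0) ((rest.count k : Int)) := by
        intro k hk
        have hk' : k ≠ s := Finset.ne_of_mem_erase hk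
        rw [PySem.Dict.getD_insert, if_neg hk', hcnt k, if_neg hk', add_zero]
      have hsplit := pv_split_sum rest.toFinset s
        (fun k => min (m.getD k 0) (((s :: rest).count k : Int)))
        (fun k => min ((m.insert s (m.getD s 0 - 1)).getD k 0) ((rest.count k : Int)))
        hagree
      beta_reduce at hsplit
      rw [PySem.Dict.getD_insert, if_pos rfl, hcnt s, if_pos rfl] at hsplit
      rw [List.toFinset_cons, List.length_cons]
      by_cases hb : s ∈ rest.toFinset
      · have hc := hmem.mp hb
        rw [if_pos hb] at hsplit
        omega
      · have hc : rest.count s = 0 := by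
          rw [List.count_eq_zero]
          exact fun hmm => hb (List.mem_toFinset.mpr hmm)
        rw [if_neg hb] at hsplit
        omega
    · -- value missing: count += 1, m unchanged
      have hstep : (if (c, m).2.getD s 0 > 0 then ((c, m).1, (c, m).2.insert s ((c, m).2.getD s 0 - 1))
          else ((c, m).1 + 1, (c, m).2)) = (c + 1, m) := by simp [hs]
      rw [hstep, ih (c + 1) m hm]
      have hagree : ∀ k ∈ rest.toFinset.erase s,
          min (m.getD k 0) (((s :: rest).count k : Int))
            = min (m.getD k 0) ((rest.count k : Int)) := by
        intro k hk
        have hk' : k ≠ s := Finset.ne_of_mem_erase hk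
        rw [hcnt k, if_neg hk', add_zero]
      have hsplit := pv_split_sum rest.toFinset s
        (fun k => min (m.getD k 0) (((s :: rest).count k : Int)))
        (fun k => min (m.getD k 0) ((rest.count k : Int)))
        hagree
      beta_reduce at hsplit
      rw [hcnt s, if_pos rfl] at hsplit
      have hms : m.getD s 0 = 0 := by have := hm s; omega
      rw [List.toFinset_cons, List.length_cons]
      by_cases hb : s ∈ rest.toFinset
      · rw [if_pos hb] at hsplit
        omega
      · have hc : rest.count s = 0 := by
          rw [List.count_eq_zero]
          exact fun hmm => hb (List.mem_toFinset.mpr hmm)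
        rw [if_neg hb] at hsplit
        omega

-- ===== VERDICT (by name: the statement is the Claim_ definition above) =====
theorem minimumSwitchingTimes_spec : Claim_equal_minimumSwitchingTimes := by
  intro source target _
  unfold Spec_minimumSwitchingTimes
  simp only [minimumSwitchingTimes, minimumSwitchingTimes_alt]
  rw [← List.foldl_flatten, ← List.foldl_flatten, ← List.foldl_flatten,
    PySem.Dict.foldl_insert_getD_add_one_eq_counter,
    PySem.List.foldl_prod_mk (f := fun (d : PySem.Dict Int Int) v => d.insert v (d.getD v 0 + 1))
      (g := fun (t : Int) _ => t + 1),
    PySem.Dict.foldl_insert_getD_add_one_eq_counter]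
  rw [pv_greedy_count target.flatten 0 (PySem.Dict.counter source.flatten)
      (fun k => by rw [PySem.Dict.getD_counter]; exact Int.natCast_nonneg _)]
  have hsum : ∑ k ∈ target.flatten.toFinset,
      min ((PySem.Dict.counter source.flatten).getD k 0) ((target.flatten.count k : Int))
      = ((PySem.Dict.counter target.flatten).items.map
          (fun p => min ((PySem.Dict.counter source.flatten).getD p.1 0) p.2)).sum := by
    rw [PySem.Dict.items_counter, List.map_map]
    have hfin : target.flatten.toFinset = (PySem.Set.ofList target.flatten).toFinset := by
      ext x
      simp [List.mem_toFinset, PySem.Set.mem_ofList]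
    rw [hfin, List.sum_toFinset _ (PySem.Set.nodup_ofList target.flatten)]
    rfl
  rw [hsum]
  have hlen : target.flatten.foldl (fun (t : Int) _ => t + 1) 0 = (target.flatten.length : Int) := by
    rw [PySem.List.foldl_add (g := fun _ => (1 : Int)), List.map_const', List.sum_replicate]
    simp
  rw [hlen]
  ring
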